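-- pv_equiv track=rewrite | github.com/PhilippCode1/BitgetKiTrading | scripts/verify_shadow_burn_in.py | _verdict_from_results
-- ===== SOURCE A (Python) =====
-- from typing import Any
--
-- def _verdict_from_results(
--     results: list[tuple[str, bool, str, Any]],
-- ) -> str:
--     if any((not o) and ("NO_EVIDENCE:" in (e or "")) for _, o, e, _ in results):
--         return "NO_EVIDENCE"
--     if all(t[1] for t in results):
--         return "PASS"
--     return "FAIL"
-- ===== SOURCE B (Python) =====
-- from typing import Any
--
-- _VERDICTS = ("PASS", "FAIL", "NO_EVIDENCE")
--
-- def _severity(ok: bool, err: str) -> int: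
--     if ok:
--         return 0
--     return 2 if "NO_EVIDENCE:" in (err or "") else 1
--
-- def _verdict_from_results(
--     results: list[tuple[str, bool, str, Any]],
-- ) -> str:
--     return _VERDICTS[max((_severity(o, e) for _, o, e, _ in results), default=0)]
-- ===== Notes on version B (the rewrite author's own statement) =====
-- stated objective: alternative
-- what changed: Replaces A's two boolean scans (any + all) with a severity-rank reduction: each result maps to a rank PASS=0/FAIL=1/NO_EVIDENCE=2, the verdict is a table lookup at the maximum rank (0 on empty).
import Mathlib
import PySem

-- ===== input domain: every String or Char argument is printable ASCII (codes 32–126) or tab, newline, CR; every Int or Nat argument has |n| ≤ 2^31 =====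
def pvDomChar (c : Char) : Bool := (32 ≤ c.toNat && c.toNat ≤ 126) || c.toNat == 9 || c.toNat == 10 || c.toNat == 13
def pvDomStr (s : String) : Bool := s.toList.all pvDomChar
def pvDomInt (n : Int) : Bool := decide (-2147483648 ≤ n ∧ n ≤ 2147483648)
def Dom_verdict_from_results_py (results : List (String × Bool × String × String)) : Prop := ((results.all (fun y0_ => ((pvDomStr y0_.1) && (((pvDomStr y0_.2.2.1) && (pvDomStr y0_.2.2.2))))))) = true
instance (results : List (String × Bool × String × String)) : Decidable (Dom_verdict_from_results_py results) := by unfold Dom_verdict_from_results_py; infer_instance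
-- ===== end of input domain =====

-- B replaces A's two boolean scans with a max over per-result severity ranks and a table lookup; return value only.


-- ===== PORT A =====
-- 'e or ""' ported as 'if e == "" then "" else e' (exact for str: falsy iff empty)
def verdict_from_results_py (results : List (String × Bool × String × String)) : String :=
  if results.any (fun t => (!t.2.1) && PySem.Str.isIn "NO_EVIDENCE:" (if t.2.2.1 == "" then "" else t.2.2.1)) then
    "NO_EVIDENCE"
  else if results.all (fun t => t.2.1) then "PASS"
  else "FAIL"

-- ===== PORT B =====
-- severity rank per result: PASS=0, FAIL=1, NO_EVIDENCE=2
def pvSeverity (ok : Bool) (err : String) : Nat :=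
  if ok then 0
  else if PySem.Str.isIn "NO_EVIDENCE:" (if err == "" then "" else err) then 2 else 1

-- verdict table ("PASS", "FAIL", "NO_EVIDENCE")[i]
def pvVerdictTable (i : Nat) : String :=
  match i with
  | 0 => "PASS"
  | 1 => "FAIL"
  | _ => "NO_EVIDENCE"

def verdict_from_results_py_alt (results : List (String × Bool × String × String)) : String :=
  pvVerdictTable ((results.map (fun t => pvSeverity t.2.1 t.2.2.1)).foldl Nat.max 0)

-- ===== PRECONDITION & SPEC =====
def Spec_verdict_from_results_py (results : List (String × Bool × String × String)) (out : String) : Prop := out = verdict_from_results_py_alt results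
instance (results : List (String × Bool × String × String)) (out : String) : Decidable (Spec_verdict_from_results_py results out) := by unfold Spec_verdict_from_results_py; infer_instance

-- ===== CLAIM (what is proved, stated in full; the proofs are below) =====
def Claim_equal_verdict_from_results_py : Prop := ∀ (results : List (String × Bool × String × String)), Dom_verdict_from_results_py results → Spec_verdict_from_results_py results (verdict_from_results_py results)

-- ===== LEMMAS AND PROOFS =====
-- One step of the max-severity fold, in terms of the head's booleans and the tail's any/all.
theorem pv_step (s : Nat) (hs : s ≤ 2) (ok noev anyb allb : Bool) :
    (s.max (if ok then 0 else if noev then 2 else 1)).max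
      (if anyb then 2 else if allb then 0 else 1)
    = s.max (if (!ok && noev || anyb) then 2 else if (ok && allb) then 0 else 1) := by
  cases ok <;> cases noev <;> cases anyb <;> cases allb <;>
    simp [Nat.max_def] <;> split_ifs <;> omega

-- The max of severities equals 2 / 1 / 0 exactly as A's any / all tests dictate.
theorem pv_max_sev (l : List (String × Bool × String × String)) (s : Nat) (hs : s ≤ 2) :
    (l.map (fun t => pvSeverity t.2.1 t.2.2.1)).foldl Nat.max s
    = s.max (if l.any (fun t => (!t.2.1) && PySem.Str.isIn "NO_EVIDENCE:" (if t.2.2.1 == "" then "" else t.2.2.1)) then 2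
             else if l.all (fun t => t.2.1) then 0 else 1) := by
  induction l generalizing s with
  | nil => simp
  | cons h tl ih =>
    simp only [List.map_cons, List.foldl_cons, List.any_cons, List.all_cons]
    rw [ih (s.max (pvSeverity h.2.1 h.2.2.1))
        (by unfold pvSeverity; split_ifs <;> simp <;> omega)]
    unfold pvSeverity
    exact pv_step s hs _ _ _ _

-- ===== VERDICT (by name: the statement is the Claim_ definition above) =====
theorem verdict_from_results_py_spec : Claim_equal_verdict_from_results_py := by
  intro results _
  unfold Spec_verdict_from_results_py verdict_from_results_py verdict_from_results_py_alt
  rw [pv_max_sev results 0 (by omega)]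
  split_ifs <;> simp [pvVerdictTable]
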